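-- pv_equiv track=rewrite | github.com/Sudhansan5/InterviewBit-Solution-Python | Queue/generate_combination.py | Solve
-- ===== SOURCE A (Python) =====
-- from collections import deque
--
-- def Solve(A,B):
--     A.sort()
--     q=deque()
--     ans=[]
--     for i in A:
--         q.append(i)
--     while q:
--         b=q.popleft()
--         ans.append(b)
--         if len(ans)==B:
--             break
--         for i in A:
--             c = str(b)+str(i)
--             q.append(int(c))
--     return ans
-- ===== SOURCE B (Python) =====
-- def Solve(A, B):
--     # Queue-free: the n-th BFS value is built from its parent's value via the
--     # bijective base-k parent index, memoised in the output list itself.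
--     # Sorts A in place like the original.
--     A.sort()
--     if not A:
--         return []
--     k = len(A)
--     out = []
--     for n in range(1, B + 1):
--         r = n % k
--         if r == 0:
--             r = k
--         parent = (n - r) // k
--         if parent == 0:
--             out.append(A[r - 1])
--         else:
--             out.append(int(str(out[parent - 1]) + str(A[r - 1])))
--     return out
-- ===== Notes on version B (the rewrite author's own statement) =====
-- stated objective: faster
-- what changed: Replaces the BFS queue (which materialises and string-concatenates every child of every emitted node, ~B*len(A) int(str+str) conversions and an O(B*len(A)) queue) by direct indexing: the n-th output is computed from the bijective base-k digits of n, so only the B emitted values are ever built and no queue exists.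
import Mathlib
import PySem

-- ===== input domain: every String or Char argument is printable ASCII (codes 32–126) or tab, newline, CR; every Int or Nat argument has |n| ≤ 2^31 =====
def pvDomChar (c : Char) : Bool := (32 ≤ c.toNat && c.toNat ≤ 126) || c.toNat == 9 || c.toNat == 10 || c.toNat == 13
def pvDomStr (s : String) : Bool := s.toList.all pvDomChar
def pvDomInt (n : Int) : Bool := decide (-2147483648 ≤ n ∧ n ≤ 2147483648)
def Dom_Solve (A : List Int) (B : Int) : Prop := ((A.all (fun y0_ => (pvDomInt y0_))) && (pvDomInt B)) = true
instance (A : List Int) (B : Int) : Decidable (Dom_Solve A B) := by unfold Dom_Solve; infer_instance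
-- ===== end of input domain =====

-- B replaces A's BFS queue by direct indexing: the n-th output is built from its parent's
-- already-emitted value via the bijective base-k parent index (no queue, no concatenations
-- for never-emitted children).  Both Pythons sort A in place; the equivalence proved here
-- is about the RETURN value (B performs the same in-place sort).

-- ===== PORT A =====
-- int(str(b) + str(i)), exact via PySem; the .getD 0 default is unreachable on Pre_ inputs
def pyCat (b i : Int) : Int := (PySem.Int.ofStr? (PySem.Int.toStr b ++ PySem.Int.toStr i)).getD 0

-- the while-loop of A; fuel = B.toNat suffices because each iteration appends exactly one
-- element to ans and the loop breaks at len(ans) == B (fuel is only a totality guard)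
def solveLoop (As : List Int) (B : Int) : Nat → List Int → List Int → List Int
  | 0, _, ans => ans
  | _ + 1, [], ans => ans
  | fuel + 1, b :: rest, ans =>
      let ans' := ans ++ [b]
      if (ans'.length : Int) = B then ans'
      else solveLoop As B fuel (rest ++ As.map (fun i => pyCat b i))  ans'

def Solve (A : List Int) (B : Int) : List Int :=
  let As := PySem.List.sorted A (fun x => x) false
  solveLoop As B B.toNat As []

-- ===== PORT B =====
-- the for-loop of Source B: n runs over 1..B (here n = t+1), each value built from
-- out[parent-1]; A[r-1]/out[parent-1] rendered by getD (indices provably in range)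
def Solve_alt (A : List Int) (B : Int) : List Int :=
  let As := PySem.List.sorted A (fun x => x) false
  if As = [] then []
  else
    (List.range B.toNat).foldl (fun out t =>
      let n := t + 1
      let r0 := n % As.length
      let r := if r0 = 0 then As.length else r0
      let parent := (n - r) / As.length
      if parent = 0 then out ++ [As.getD (r - 1) 0]
      else out ++ [pyCat (out.getD (parent - 1) 0) (As.getD (r - 1) 0)]) []

-- ===== PRECONDITION & SPEC =====
-- Pre_ excludes exactly the inputs where Python A does not return normally: with A nonempty,
-- B ≤ 0 diverges (the break `len(ans)==B` never fires) unless a negative element makes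
-- int(str(b)+str(i)) raise ValueError first, and B ≥ 2 with a negative element raises
-- ValueError; A = [] returns [] for every B and is fully included.
def Pre_Solve (A : List Int) (B : Int) : Prop :=
  A = [] ∨ (1 ≤ B ∧ (B = 1 ∨ ∀ x ∈ A, 0 ≤ x))
instance (A : List Int) (B : Int) : Decidable (Pre_Solve A B) := by
  unfold Pre_Solve; infer_instance

def pvWitness_Solve : List Int × Int := ([2, 1, 2], 7)

def Spec_Solve (A : List Int) (B : Int) (out : List Int) : Prop := out = Solve_alt A B
instance (A : List Int) (B : Int) (out : List Int) : Decidable (Spec_Solve A B out) := by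
  unfold Spec_Solve; infer_instance

-- ===== CLAIM (what is proved, stated in full; the proofs are below) =====
def Claim_equal_Solve : Prop :=
  ∀ (A : List Int) (B : Int), Dom_Solve A B → Pre_Solve A B → Spec_Solve A B (Solve A B)

-- ===== LEMMAS AND PROOFS =====

-- value of the n-th BFS node (1-indexed level order), defined by recursion on the
-- bijective base-k parent index; both ports are proved to list valOf 1, …, valOf B
def valOf (As : List Int) (k : Nat) (n : Nat) : Int :=
  if h : n = 0 ∨ k = 0 then 0
  else if hr : n % k = 0 then
    (if (n - k) / k = 0 then As.getD (k - 1) 0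
     else pyCat (valOf As k ((n - k) / k)) (As.getD (k - 1) 0))
  else
    (if (n - n % k) / k = 0 then As.getD (n % k - 1) 0
     else pyCat (valOf As k ((n - n % k) / k)) (As.getD (n % k - 1) 0))
termination_by n
decreasing_by
  · have h1 : (n - k) / k ≤ n - k := Nat.div_le_self _ _
    have h2 : k ≤ n := Nat.le_of_dvd (by omega) (Nat.dvd_of_mod_eq_zero hr)
    omega
  · have h1 : (n - n % k) / k ≤ n - n % k := Nat.div_le_self _ _
    have h2 : n % k ≤ n := Nat.mod_le n k
    omega

-- valOf unfolded in the exact shape of Source B's loop body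
theorem valOf_step (As : List Int) (k n : Nat) (hk : 1 ≤ k) (hn : 1 ≤ n) :
    valOf As k n
      = (if (n - (if n % k = 0 then k else n % k)) / k = 0 then
           As.getD ((if n % k = 0 then k else n % k) - 1) 0
         else
           pyCat (valOf As k ((n - (if n % k = 0 then k else n % k)) / k))
             (As.getD ((if n % k = 0 then k else n % k) - 1) 0)) := by
  rw [valOf]
  have hc : ¬ (n = 0 ∨ k = 0) := by omega
  rw [dif_neg hc]
  by_cases hr : n % k = 0 <;> simp [hr]

theorem parent_lt (k n : Nat) (hk : 1 ≤ k) (hn : 1 ≤ n) :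
    (n - (if n % k = 0 then k else n % k)) / k < n := by
  have h2 : n % k ≤ n := Nat.mod_le n k
  by_cases hr : n % k = 0
  · have h3 : k ≤ n := Nat.le_of_dvd (by omega) (Nat.dvd_of_mod_eq_zero hr)
    have h1 : (n - k) / k ≤ n - k := Nat.div_le_self _ _
    simp only [hr, if_pos]
    omega
  · have h1 : (n - n % k) / k ≤ n - n % k := Nat.div_le_self _ _
    rw [if_neg hr]
    omega

theorem val_base (As : List Int) (k d : Nat) (h1 : 1 ≤ d) (h2 : d ≤ k) :
    valOf As k d = As.getD (d - 1) 0 := by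
  rw [valOf_step As k d (by omega) h1]
  rcases Nat.lt_or_ge d k with hlt | hge
  · have hmod : d % k = d := Nat.mod_eq_of_lt hlt
    have hr : ¬ d % k = 0 := by omega
    rw [if_neg hr, hmod, Nat.sub_self, Nat.zero_div, if_pos rfl]
  · have hdk : d = k := le_antisymm h2 hge
    subst hdk
    rw [if_pos (Nat.mod_self d), Nat.sub_self, Nat.zero_div, if_pos rfl]

theorem val_child (As : List Int) (k m d : Nat) (hk : 1 ≤ k) (hm : 1 ≤ m)
    (h1 : 1 ≤ d) (h2 : d ≤ k) :
    valOf As k (m * k + d) = pyCat (valOf As k m) (As.getD (d - 1) 0) := by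
  rw [valOf_step As k (m * k + d) hk (by omega)]
  rcases Nat.lt_or_ge d k with hlt | hge
  · have hmod : (m * k + d) % k = d := by
      rw [Nat.add_comm, Nat.add_mul_mod_self_right, Nat.mod_eq_of_lt hlt]
    have hr : ¬ (m * k + d) % k = 0 := by omega
    have hdiv : (m * k + d - (m * k + d) % k) / k = m := by
      rw [hmod, Nat.add_sub_cancel, Nat.mul_div_cancel _ (by omega)]
    rw [if_neg hr, hdiv, if_neg (show ¬ m = 0 by omega), hmod]
  · have hdk : d = k := le_antisymm h2 hge
    subst hdk
    have hmul : m * d + d = (m + 1) * d := by ring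
    have hmod : (m * d + d) % d = 0 := by rw [hmul, Nat.mul_mod_left]
    have hdiv : (m * d + d - d) / d = m := by
      rw [Nat.add_sub_cancel, Nat.mul_div_cancel _ (by omega)]
    rw [if_pos hmod, hdiv, if_neg (show ¬ m = 0 by omega)]

theorem children_eq (As : List Int) (k m : Nat) (h : As.length = k) (hk : 1 ≤ k) (hm : 1 ≤ m) :
    As.map (fun i => pyCat (valOf As k m) i)
      = (List.range k).map (fun j => valOf As k (m * k + 1 + j)) := by
  apply List.ext_getElem
  · simp [h]
  · intro i hi1 hi2
    have hik : i < k := by simpa using hi2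
    have hiA : i < As.length := by omega
    simp only [List.getElem_map, List.getElem_range]
    rw [show m * k + 1 + i = m * k + (i + 1) by omega,
        val_child As k m (i + 1) hk hm (by omega) (by omega)]
    congr 1
    simp [List.getD_eq_getElem?_getD, List.getElem?_eq_getElem hiA]

theorem loop_eq (As : List Int) (B : Int) (k' : Nat) (h : As.length = k' + 1) (hB : 1 ≤ B) :
    ∀ fuel t, t + fuel = B.toNat →
      solveLoop As B fuel
          ((List.range (t * k' + k' + 1)).map (fun j => valOf As (k' + 1) (t + 1 + j)))
          ((List.range t).map (fun j => valOf As (k' + 1) (j + 1)))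
        = (List.range B.toNat).map (fun j => valOf As (k' + 1) (j + 1)) := by
  intro fuel
  induction fuel with
  | zero =>
      intro t ht
      have : t = B.toNat := by omega
      subst this
      simp [solveLoop]
  | succ f ih =>
      intro t ht
      have hdec : t * k' + k' + 1 = (t * k' + k') + 1 := rfl
      rw [hdec, List.range_succ_eq_map, List.map_cons, List.map_map]
      rw [solveLoop]
      have hans : ((List.range t).map (fun j => valOf As (k' + 1) (j + 1)))
            ++ [valOf As (k' + 1) (t + 1 + 0)]
          = (List.range (t + 1)).map (fun j => valOf As (k' + 1) (j + 1)) := by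
        rw [List.range_succ, List.map_append]
        simp
      rw [hans]
      have hlen : (((List.range (t + 1)).map
          (fun j => valOf As (k' + 1) (j + 1))).length : Int) = (t + 1 : Nat) := by
        simp
      by_cases hf : f = 0
      · subst hf
        have htB : ((t + 1 : Nat) : Int) = B := by omega
        rw [if_pos (by rw [hlen]; exact htB)]
        have : t + 1 = B.toNat := by omega
        rw [this]
      · have htB : ¬ (((t + 1 : Nat) : Int) = B) := by omega
        rw [if_neg (by rw [hlen]; exact htB)]
        have hq : ((List.range (t * k' + k')).map
              ((fun j => valOf As (k' + 1) (t + 1 + j)) ∘ (fun j => j + 1)))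
              ++ As.map (fun i => pyCat (valOf As (k' + 1) (t + 1 + 0)) i)
            = (List.range ((t + 1) * k' + k' + 1)).map
                (fun j => valOf As (k' + 1) ((t + 1) + 1 + j)) := by
          rw [children_eq As (k' + 1) (t + 1) h (by omega) (by omega)]
          symm
          have hsum : (t + 1) * k' + k' + 1 = (t * k' + k') + (k' + 1) := by
            have : (t + 1) * k' = t * k' + k' := by ring
            omega
          rw [hsum, List.range_add, List.map_append, List.map_map]
          congr 1
          · apply List.map_congr_left
            intro j hj
            simp only [Function.comp]
            congr 1
            omega
          · apply List.map_congr_left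
            intro j hj
            simp only [Function.comp]
            congr 1
            have : (t + 1) * (k' + 1) = t * k' + t + k' + 1 := by ring
            omega
        rw [hq]
        exact ih (t + 1) (by omega)

-- Source B's loop builds exactly the list of valOf 1, …, valOf t
theorem build_eq (As : List Int) (hA : 1 ≤ As.length) :
    ∀ t, (List.range t).foldl (fun out u =>
        let n := u + 1
        let r0 := n % As.length
        let r := if r0 = 0 then As.length else r0
        let parent := (n - r) / As.length
        if parent = 0 then out ++ [As.getD (r - 1) 0]
        else out ++ [pyCat (out.getD (parent - 1) 0) (As.getD (r - 1) 0)]) []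
      = (List.range t).map (fun j => valOf As As.length (j + 1)) := by
  intro t
  induction t with
  | zero => simp
  | succ u ih =>
      rw [List.range_succ, List.foldl_append, List.foldl_cons, List.foldl_nil, ih,
          List.map_append]
      simp only [List.map_cons, List.map_nil]
      set k := As.length with hk
      set n := u + 1 with hn
      set r := if n % k = 0 then k else n % k with hr
      have hplt : (n - r) / k < n := by rw [hr]; exact parent_lt k n hA (by omega)
      obtain ⟨p, hpdef⟩ : ∃ p, (n - r) / k = p := ⟨_, rfl⟩
      rw [hpdef] at hplt ⊢
      have hstep := valOf_step As k n hA (by omega)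
      rw [← hr, hpdef] at hstep
      by_cases hp : p = 0
      · rw [if_pos hp]
        rw [if_pos hp] at hstep
        rw [← hstep]
      · rw [if_neg hp]
        rw [if_neg hp] at hstep
        have hget : ((List.range u).map (fun j => valOf As k (j + 1))).getD
            (p - 1) 0 = valOf As k p := by
          have hlt : p - 1 < u := by omega
          simp [List.getD_eq_getElem?_getD, List.getElem?_map, List.getElem?_range hlt]
          congr 1
          omega
        rw [hget, ← hstep]

-- ===== VERDICT (by name: the statement is the Claim_ definition above) =====
theorem Solve_spec : Claim_equal_Solve := by
  intro A B _ hpre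
  unfold Spec_Solve
  simp only [Solve, Solve_alt]
  by_cases hA : A = []
  · subst hA
    have hnil : PySem.List.sorted ([] : List Int) (fun x => x) false = [] :=
      List.Perm.eq_nil (PySem.List.sorted_perm ([] : List Int) (fun x => x) false)
    rw [hnil]
    cases hB : B.toNat <;> simp [solveLoop]
  · have hB : 1 ≤ B := by
      rcases hpre with h | ⟨h, _⟩
      · exact absurd h hA
      · exact h
    set As := PySem.List.sorted A (fun x => x) false with hAsdef
    have hlenA : As.length = A.length := PySem.List.length_sorted A (fun x => x) false
    have hAne : As ≠ [] := by
      intro h0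
      apply hA
      have hl : A.length = 0 := by rw [← hlenA, h0]; rfl
      exact List.eq_nil_of_length_eq_zero hl
    obtain ⟨k', hk⟩ : ∃ k', As.length = k' + 1 := by
      cases hAs : As with
      | nil => exact absurd hAs hAne
      | cons a l => exact ⟨l.length, by simp⟩
    rw [if_neg hAne]
    have key := loop_eq As B k' hk hB B.toNat 0 (by omega)
    simp only [List.range_zero, List.map_nil] at key
    have hQ0 : (List.range (0 * k' + k' + 1)).map (fun j => valOf As (k' + 1) (0 + 1 + j))
        = As := by
      apply List.ext_getElem
      · simp [hk]
      · intro i hi1 hi2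
        have hik : i < k' + 1 := by simpa using hi1
        have hiA : i < As.length := by omega
        simp only [List.getElem_map, List.getElem_range]
        rw [show 0 + 1 + i = i + 1 by omega,
            val_base As (k' + 1) (i + 1) (by omega) (by omega)]
        simp [List.getD_eq_getElem?_getD, List.getElem?_eq_getElem hiA]
    rw [hQ0] at key
    rw [key]
    rw [build_eq As (by omega) B.toNat, hk]
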